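-- pv_equiv track=rewrite | github.com/Inventure71/AlgorithmsProject | arena/utils/find_path_bfs_with_range.py | is_target_in_range
-- ===== SOURCE A (Python) =====
-- def get_distance(p1, p2, use_diagonals):
--     """
--     Calculates distance between two points.
--     - Chebyshev (Max of dx, dy) if diagonals are allowed (standard for grid range).
--     - Manhattan (dx + dy) if diagonals are not allowed.
--     """
--     dx = abs(p1[0] - p2[0])
--     dy = abs(p1[1] - p2[1])
--     if use_diagonals:
--         return max(dx, dy)
--     return dx + dy
--
-- def is_target_in_range(current_cell, grid, goal_cell, cell_type, action_range, include_diagonals):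
--     """
--     Checks if the goal is within 'action_range' of 'current_cell'.
--     """
--     # 1. Case: Specific Goal Cell
--     if goal_cell:
--         dist = get_distance(current_cell, goal_cell, include_diagonals)
--         return dist <= action_range
--
--     # 2. Case: Specific Cell Type (Scan surroundings)
--     elif cell_type:
--         # We optimize by defining the bounding box of the range to avoid checking the whole grid
--         rows = len(grid)
--         cols = len(grid[0])
--
--         r_min = max(0, current_cell[0] - action_range)
--         r_max = min(rows - 1, current_cell[0] + action_range)
--         c_min = max(0, current_cell[1] - action_range)
--         c_max = min(cols - 1, current_cell[1] + action_range)
--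
--         for r in range(r_min, r_max + 1):
--             for c in range(c_min, c_max + 1):
--                 # Check if this cell is the type we want
--                 if grid[r][c] == cell_type:
--                     # Verify exact distance (needed because bounding box is square,
--                     # but Manhattan distance creates a diamond shape)
--                     if get_distance(current_cell, (r, c), include_diagonals) <= action_range:
--                         return True
--     return False
-- ===== SOURCE B (Python) =====
-- def is_target_in_range(current_cell, grid, goal_cell, cell_type, action_range, include_diagonals):
--     # 1. Specific goal cell: direct distance test.
--     if goal_cell:
--         dx = abs(current_cell[0] - goal_cell[0])
--         dy = abs(current_cell[1] - goal_cell[1])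
--         dist = max(dx, dy) if include_diagonals else dx + dy
--         return dist <= action_range
--
--     # 2. Specific cell type: one full pass over the grid computing the distance to the
--     #    NEAREST cell of that type (min-accumulator), then one final comparison.
--     if not cell_type:
--         return False
--
--     best = None
--     for r, row in enumerate(grid):
--         for c, v in enumerate(row):
--             if v == cell_type:
--                 dx = abs(current_cell[0] - r)
--                 dy = abs(current_cell[1] - c)
--                 d = max(dx, dy) if include_diagonals else dx + dy
--                 if best is None or d < best:
--                     best = d
--     return best is not None and best <= action_range
-- ===== Notes on version B (the rewrite author's own statement) =====
-- stated objective: alternative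
-- what changed: Instead of scanning a clipped bounding box with an early return and a per-cell distance re-check, B makes one full pass over the whole grid with a min-accumulator computing the distance to the NEAREST cell of the wanted type, and compares that minimum to action_range once at the end.
-- outside the precondition, e.g. on is_target_in_range((0, 0), [[1], [1, 5]], None, 5, 2, True): A returns False, B returns True
import Mathlib
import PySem

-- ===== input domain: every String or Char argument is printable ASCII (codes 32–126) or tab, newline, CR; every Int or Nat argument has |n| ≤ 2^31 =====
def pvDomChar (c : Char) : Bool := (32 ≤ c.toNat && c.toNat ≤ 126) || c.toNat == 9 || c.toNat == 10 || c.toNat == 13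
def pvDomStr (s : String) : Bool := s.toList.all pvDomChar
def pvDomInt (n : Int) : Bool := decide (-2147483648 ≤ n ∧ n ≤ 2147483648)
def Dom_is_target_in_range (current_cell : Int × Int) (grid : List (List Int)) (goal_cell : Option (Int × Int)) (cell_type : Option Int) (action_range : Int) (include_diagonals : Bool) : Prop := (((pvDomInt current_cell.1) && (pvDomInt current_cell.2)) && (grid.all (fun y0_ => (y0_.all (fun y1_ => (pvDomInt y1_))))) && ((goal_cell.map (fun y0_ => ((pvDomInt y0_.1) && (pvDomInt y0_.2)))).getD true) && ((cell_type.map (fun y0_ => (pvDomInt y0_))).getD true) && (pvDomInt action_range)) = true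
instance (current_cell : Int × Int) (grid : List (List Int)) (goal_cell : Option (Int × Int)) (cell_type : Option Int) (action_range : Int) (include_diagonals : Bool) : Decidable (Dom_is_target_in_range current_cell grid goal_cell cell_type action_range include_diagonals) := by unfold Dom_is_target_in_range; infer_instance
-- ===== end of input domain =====

-- B replaces A's clipped bounding-box scan (early return + per-cell distance re-check) by one
-- full pass over the grid keeping the MINIMUM distance to a cell of the wanted type, compared
-- to action_range once at the end; same cost class, a genuinely different decomposition.

-- ===== PORT A =====
-- helper get_distance of Source A
def pyDist (p1 p2 : Int × Int) (use_diagonals : Bool) : Int :=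
  let dx := |p1.1 - p2.1|
  let dy := |p1.2 - p2.2|
  if use_diagonals then max dx dy else dx + dy

-- grid[r][c]; the defaults are only reached where Python would raise
def cellAt (grid : List (List Int)) (r c : Int) : Int :=
  PySem.List.pyGetD (PySem.List.pyGetD grid r []) c 0

def is_target_in_range (current_cell : Int × Int) (grid : List (List Int)) (goal_cell : Option (Int × Int)) (cell_type : Option Int) (action_range : Int) (include_diagonals : Bool) : Bool :=
  match goal_cell with
  | some g => decide (pyDist current_cell g include_diagonals ≤ action_range)
  | none =>
    match cell_type with
    | none => false
    | some t =>
      if t = 0 then false  -- `elif cell_type:` — 0 is falsy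
      else
        let rows : Int := grid.length
        let cols : Int := (PySem.List.pyGetD grid 0 []).length
        let r_min := max 0 (current_cell.1 - action_range)
        let r_max := min (rows - 1) (current_cell.1 + action_range)
        let c_min := max 0 (current_cell.2 - action_range)
        let c_max := min (cols - 1) (current_cell.2 + action_range)
        (PySem.List.pyRange r_min (r_max + 1) 1).any (fun r =>
          (PySem.List.pyRange c_min (c_max + 1) 1).any (fun c =>
            (cellAt grid r c == t) &&
              decide (pyDist current_cell (r, c) include_diagonals ≤ action_range)))

-- ===== PORT B =====
-- `if best is None or d < best: best = d`
def bUpd (best : Option Int) (d : Int) : Option Int :=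
  match best with
  | none => some d
  | some b => if d < b then some d else some b

def is_target_in_range_alt (current_cell : Int × Int) (grid : List (List Int)) (goal_cell : Option (Int × Int)) (cell_type : Option Int) (action_range : Int) (include_diagonals : Bool) : Bool :=
  match goal_cell with
  | some g =>
    let dx := |current_cell.1 - g.1|
    let dy := |current_cell.2 - g.2|
    let dist := if include_diagonals then max dx dy else dx + dy
    decide (dist ≤ action_range)
  | none =>
    match cell_type with
    | none => false
    | some t =>
      if t = 0 then false  -- `if not cell_type:`
      else
        let best :=
          (PySem.List.enumerate grid 0).foldl (fun best rrow =>
            (PySem.List.enumerate rrow.2 0).foldl (fun best cv =>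
              if cv.2 = t then
                let dx := |current_cell.1 - rrow.1|
                let dy := |current_cell.2 - cv.1|
                let d := if include_diagonals then max dx dy else dx + dy
                bUpd best d
              else best) best) none
        -- `best is not None and best <= action_range`
        match best with
        | none => false
        | some b => decide (b ≤ action_range)

-- ===== PRECONDITION & SPEC =====
-- Pre_ excludes, when the cell_type branch is taken, the empty grid (A raises IndexError on
-- grid[0]) and ragged grids, on which A's column window taken from the first row's length is an
-- accident of the implementation: A raises when its box reaches a shorter row and silently
-- ignores cells of longer rows (see claim.json cites).
def Pre_is_target_in_range (current_cell : Int × Int) (grid : List (List Int)) (goal_cell : Option (Int × Int)) (cell_type : Option Int) (action_range : Int) (include_diagonals : Bool) : Prop :=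
  (goal_cell = none ∧ cell_type.getD 0 ≠ 0) →
    (grid ≠ [] ∧ ∀ row ∈ grid, row.length = (grid.headD []).length)
instance (current_cell : Int × Int) (grid : List (List Int)) (goal_cell : Option (Int × Int)) (cell_type : Option Int) (action_range : Int) (include_diagonals : Bool) : Decidable (Pre_is_target_in_range current_cell grid goal_cell cell_type action_range include_diagonals) := by unfold Pre_is_target_in_range; infer_instance

def pvWitness_is_target_in_range : (Int × Int) × List (List Int) × (Option (Int × Int)) × Option Int × Int × Bool :=
  ((0, 0), [[1, 2], [2, 1]], none, some 2, 1, false)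

def Spec_is_target_in_range (current_cell : Int × Int) (grid : List (List Int)) (goal_cell : Option (Int × Int)) (cell_type : Option Int) (action_range : Int) (include_diagonals : Bool) (out : Bool) : Prop := out = is_target_in_range_alt current_cell grid goal_cell cell_type action_range include_diagonals
instance (current_cell : Int × Int) (grid : List (List Int)) (goal_cell : Option (Int × Int)) (cell_type : Option Int) (action_range : Int) (include_diagonals : Bool) (out : Bool) : Decidable (Spec_is_target_in_range current_cell grid goal_cell cell_type action_range include_diagonals out) := by unfold Spec_is_target_in_range; infer_instance

-- ===== CLAIM =====
def Claim_equal_is_target_in_range : Prop := ∀ (current_cell : Int × Int) (grid : List (List Int)) (goal_cell : Option (Int × Int)) (cell_type : Option Int) (action_range : Int) (include_diagonals : Bool), Dom_is_target_in_range current_cell grid goal_cell cell_type action_range include_diagonals → Pre_is_target_in_range current_cell grid goal_cell cell_type action_range include_diagonals → Spec_is_target_in_range current_cell grid goal_cell cell_type action_range include_diagonals (is_target_in_range current_cell grid goal_cell cell_type action_range include_diagonals)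

-- ===== LEMMAS AND PROOFS =====

-- 'the running best (if any) is ≤ ar'
def bOk (best : Option Int) (ar : Int) : Bool :=
  match best with
  | none => false
  | some b => decide (b ≤ ar)

theorem bOk_bUpd (best : Option Int) (d ar : Int) :
    bOk (bUpd best d) ar = (bOk best ar || decide (d ≤ ar)) := by
  cases best with
  | none => simp [bUpd, bOk]
  | some b => simp only [bUpd, bOk]; split_ifs <;> simp <;> omega

-- inner loop: the min-accumulator's final ≤-test equals an existence test over the row
theorem inner_char (cr cc ar : Int) (diag : Bool) (t : Int) (ps : List (Int × Int))
    (r : Int) (best : Option Int) :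
    bOk (ps.foldl (fun best cv =>
        if cv.2 = t then
          let dx := |cr - r|
          let dy := |cc - cv.1|
          let d := if diag then max dx dy else dx + dy
          bUpd best d
        else best) best) ar
      = (bOk best ar ||
         ps.any (fun cv => (cv.2 == t) && decide (pyDist (cr, cc) (r, cv.1) diag ≤ ar))) := by
  induction ps generalizing best with
  | nil => simp
  | cons p ps ih =>
    simp only [List.foldl_cons, List.any_cons, ih]
    by_cases h : p.2 = t
    · simp [h, bOk_bUpd, pyDist, Bool.or_assoc]
    · have hb : (p.2 == t) = false := by simp [h]
      simp [if_neg h, hb]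

-- outer loop
theorem outer_char (cr cc ar : Int) (diag : Bool) (t : Int) (rs : List (Int × List Int))
    (best : Option Int) :
    bOk (rs.foldl (fun best rrow =>
        (PySem.List.enumerate rrow.2 0).foldl (fun best cv =>
          if cv.2 = t then
            let dx := |cr - rrow.1|
            let dy := |cc - cv.1|
            let d := if diag then max dx dy else dx + dy
            bUpd best d
          else best) best) best) ar
      = (bOk best ar ||
         rs.any (fun rrow => (PySem.List.enumerate rrow.2 0).any
           (fun cv => (cv.2 == t) && decide (pyDist (cr, cc) (rrow.1, cv.1) diag ≤ ar)))) := by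
  induction rs generalizing best with
  | nil => simp
  | cons p ps ih =>
    simp only [List.foldl_cons, List.any_cons, ih, inner_char, Bool.or_assoc]

-- a distance bound caps each coordinate difference, in both metrics
theorem dist_coord_le (cr cc r c ar : Int) (diag : Bool)
    (h : pyDist (cr, cc) (r, c) diag ≤ ar) : |cr - r| ≤ ar ∧ |cc - c| ≤ ar := by
  simp only [pyDist] at h
  have h1 := abs_nonneg (cr - r)
  have h2 := abs_nonneg (cc - c)
  cases diag <;> simp at h <;> constructor <;> omega

-- the two scans agree on nonempty rectangular grids
theorem scan_eq (grid : List (List Int)) (t cr cc ar : Int) (diag : Bool)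
    (hne : grid ≠ []) (hrect : ∀ row ∈ grid, row.length = (grid.headD []).length) :
    ((PySem.List.pyRange (max 0 (cr - ar)) (min ((grid.length : Int) - 1) (cr + ar) + 1) 1).any (fun r =>
      (PySem.List.pyRange (max 0 (cc - ar)) (min (((PySem.List.pyGetD grid 0 []).length : Int) - 1) (cc + ar) + 1) 1).any (fun c =>
        (cellAt grid r c == t) && decide (pyDist (cr, cc) (r, c) diag ≤ ar))))
    = ((PySem.List.enumerate grid 0).any (fun rrow => (PySem.List.enumerate rrow.2 0).any
         (fun cv => (cv.2 == t) && decide (pyDist (cr, cc) (rrow.1, cv.1) diag ≤ ar)))) := by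
  have hcols : PySem.List.pyGetD grid 0 [] = grid.headD [] := by
    rw [PySem.List.pyGetD_zero]; cases grid <;> rfl
  rw [Bool.eq_iff_iff]
  simp only [List.any_eq_true, PySem.List.mem_pyRange_one, Bool.and_eq_true,
    decide_eq_true_eq, beq_iff_eq, PySem.List.mem_enumerate_iff, hcols]
  constructor
  · rintro ⟨r, ⟨hr1, hr2⟩, c, ⟨hc1, hc2⟩, hcell, hdist⟩
    have hr0 : 0 ≤ r := by omega
    have hc0 : 0 ≤ c := by omega
    have hr : r.toNat < grid.length := by omega
    have hrowlen : (grid[r.toNat]).length = (grid.headD []).length :=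
      hrect _ (List.getElem_mem hr)
    have hc : c.toNat < (grid[r.toNat]).length := by omega
    have hcell' : grid[r.toNat][c.toNat] = t := by
      rw [cellAt, PySem.List.pyGetD_eq_getElem grid [] hr0 (by push_cast; omega),
          PySem.List.pyGetD_eq_getElem _ 0 hc0 (by push_cast; omega)] at hcell
      exact hcell
    refine ⟨(r, grid[r.toNat]), ⟨r.toNat, hr, by simp; omega⟩,
      (c, grid[r.toNat][c.toNat]), ⟨c.toNat, hc, by simp; omega⟩, hcell', hdist⟩
  · rintro ⟨p, ⟨rk, hrk, rfl⟩, q, ⟨ck, hck, rfl⟩, hval, hdist⟩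
    simp only [zero_add] at hval hdist hck
    have hrowlen : (grid[rk]).length = (grid.headD []).length :=
      hrect _ (List.getElem_mem hrk)
    obtain ⟨hco1, hco2⟩ := dist_coord_le cr cc (rk : Int) (ck : Int) ar diag hdist
    rw [abs_le] at hco1 hco2
    have hck2 : ck < (grid.headD []).length := by rw [← hrowlen]; simpa using hck
    refine ⟨(rk : Int), ⟨by omega, by omega⟩, (ck : Int), ⟨by omega, by omega⟩, ?_, hdist⟩
    rw [cellAt, PySem.List.pyGetD_eq_getElem grid [] (by omega) (by push_cast; omega),
        PySem.List.pyGetD_eq_getElem _ 0 (by omega)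
          (by simp only [Int.toNat_natCast]; push_cast; omega)]
    simpa using hval

-- ===== VERDICT =====
theorem is_target_in_range_spec : Claim_equal_is_target_in_range := by
  intro current_cell grid goal_cell cell_type action_range include_diagonals _ hpre
  unfold Spec_is_target_in_range
  obtain ⟨cr, cc⟩ := current_cell
  cases goal_cell with
  | some g => simp [is_target_in_range, is_target_in_range_alt, pyDist]
  | none =>
    cases cell_type with
    | none => rfl
    | some t =>
      by_cases ht : t = 0
      · simp [is_target_in_range, is_target_in_range_alt, ht]
      · obtain ⟨hne, hrect⟩ := hpre ⟨rfl, by simpa using ht⟩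
        simp only [is_target_in_range, is_target_in_range_alt, if_neg ht]
        rw [scan_eq grid t cr cc action_range include_diagonals hne hrect]
        rw [show (none : Option Int) = none from rfl]
        -- relate B's fold-then-test to bOk + outer_char
        have := outer_char cr cc action_range include_diagonals t
          (PySem.List.enumerate grid 0) none
        simp only [bOk] at this
        exact (by simpa using this.symm)
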